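-- pv_equiv track=rewrite | github.com/ksid2104/Hirsch-Dashboard | Dashboard_Hirsch.py | get_required_forex_pairs
-- ===== SOURCE A (Python) =====
-- COUNTRY_CURRENCIES = {
--     'USA': 'USD',
--     'France': 'EUR',
--     'Germany': 'EUR',
--     'UK': 'GBP',
--     'China': 'CNY',
--     'Japan': 'JPY',
--     'Switzerland': 'CHF'
-- }
--
-- def get_required_forex_pairs(countries):
--     currencies = set()
--     for country in countries:
--         if country in COUNTRY_CURRENCIES:
--             currencies.add(COUNTRY_CURRENCIES[country])
--
--     pairs = []
--     if 'EUR' in currencies: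
--         pairs.append('EURUSD')
--     if 'GBP' in currencies:
--         pairs.append('GBPUSD')
--     if 'JPY' in currencies:
--         pairs.append('USDJPY')
--     if 'CNY' in currencies:
--         pairs.append('USDCNY')
--     if 'CHF' in currencies:
--         pairs.append('USDCHF')
--
--     return pairs
-- ===== SOURCE B (Python) =====
-- COUNTRY_CURRENCIES = {
--     'USA': 'USD',
--     'France': 'EUR',
--     'Germany': 'EUR',
--     'UK': 'GBP',
--     'China': 'CNY',
--     'Japan': 'JPY',
--     'Switzerland': 'CHF'
-- }
--
-- # Ordered rule table: (currency, required pair).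
-- FOREX_RULES = [
--     ('EUR', 'EURUSD'),
--     ('GBP', 'GBPUSD'),
--     ('JPY', 'USDJPY'),
--     ('CNY', 'USDCNY'),
--     ('CHF', 'USDCHF'),
-- ]
--
-- def get_required_forex_pairs(countries):
--     return [pair for currency, pair in FOREX_RULES
--             if any(COUNTRY_CURRENCIES.get(c) == currency for c in countries)]
-- ===== Notes on version B (the rewrite author's own statement) =====
-- stated objective: simpler
-- what changed: Replaces the build-a-currency-set-then-five-hardcoded-ifs structure with a data-driven ordered rule table, selecting each pair by rescanning the country list with any(); no intermediate set is built.
import Mathlib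
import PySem

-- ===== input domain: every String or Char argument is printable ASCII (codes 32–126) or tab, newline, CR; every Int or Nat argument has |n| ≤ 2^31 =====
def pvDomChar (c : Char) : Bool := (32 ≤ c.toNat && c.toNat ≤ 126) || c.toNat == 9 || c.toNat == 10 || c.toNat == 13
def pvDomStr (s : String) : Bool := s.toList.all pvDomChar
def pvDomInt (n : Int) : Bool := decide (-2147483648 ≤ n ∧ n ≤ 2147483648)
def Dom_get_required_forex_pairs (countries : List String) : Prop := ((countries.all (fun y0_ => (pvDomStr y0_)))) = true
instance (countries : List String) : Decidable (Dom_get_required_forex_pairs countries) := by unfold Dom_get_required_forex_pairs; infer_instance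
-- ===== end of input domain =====

-- B replaces the currency-set-then-five-ifs structure with an ordered rule table scanned per rule (simpler, data-driven); equivalent.
-- ===== PORT A =====
def pvCountryCurrencies : PySem.Dict String String :=
  PySem.Dict.ofList [("USA","USD"),("France","EUR"),("Germany","EUR"),("UK","GBP"),
   ("China","CNY"),("Japan","JPY"),("Switzerland","CHF")]

def get_required_forex_pairs (countries : List String) : List String :=
  let currencies : PySem.Set String := countries.foldl (fun s country =>
    match pvCountryCurrencies.get? country with
    | some v => PySem.Set.add s v
    | none => s) PySem.Set.empty
  let pairs : List String := []
  let pairs := if PySem.Set.contains currencies "EUR" then pairs ++ ["EURUSD"] else pairs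
  let pairs := if PySem.Set.contains currencies "GBP" then pairs ++ ["GBPUSD"] else pairs
  let pairs := if PySem.Set.contains currencies "JPY" then pairs ++ ["USDJPY"] else pairs
  let pairs := if PySem.Set.contains currencies "CNY" then pairs ++ ["USDCNY"] else pairs
  let pairs := if PySem.Set.contains currencies "CHF" then pairs ++ ["USDCHF"] else pairs
  pairs

-- ===== PORT B =====
def pvForexRules : List (String × String) :=
  [("EUR","EURUSD"),("GBP","GBPUSD"),("JPY","USDJPY"),("CNY","USDCNY"),("CHF","USDCHF")]

def get_required_forex_pairs_alt (countries : List String) : List String :=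
  (pvForexRules.filter (fun r =>
      countries.any (fun c => pvCountryCurrencies.get? c == some r.1))).map Prod.snd

-- ===== PRECONDITION & SPEC =====
def Spec_get_required_forex_pairs (countries : List String) (out : List String) : Prop := out = get_required_forex_pairs_alt countries
instance (countries : List String) (out : List String) : Decidable (Spec_get_required_forex_pairs countries out) := by unfold Spec_get_required_forex_pairs; infer_instance

-- ===== CLAIM (what is proved, stated in full; the proofs are below) =====
def Claim_equal_get_required_forex_pairs : Prop := ∀ (countries : List String), Dom_get_required_forex_pairs countries → Spec_get_required_forex_pairs countries (get_required_forex_pairs countries)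

-- ===== LEMMAS AND PROOFS =====

-- ===== VERDICT (by name: the statement is the Claim_ definition above) =====
lemma mem_currFold (countries : List String) (s : List String) (x : String) :
    (x ∈ countries.foldl (fun s country =>
      match pvCountryCurrencies.get? country with
      | some v => PySem.Set.add s v
      | none => s) s) ↔
    x ∈ s ∨ countries.any (fun c => pvCountryCurrencies.get? c == some x) := by
  induction countries generalizing s with
  | nil => simp
  | cons c cs ih =>
    simp only [List.foldl_cons, List.any_cons, ih]
    cases h : pvCountryCurrencies.get? c with
    | none => simp
    | some v =>
      simp only [PySem.Set.mem_add, Bool.or_eq_true, beq_iff_eq, Option.some.injEq]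
      constructor
      · rintro (⟨hx | rfl⟩ | hx) <;> tauto
      · rintro (hx | rfl | hx) <;> tauto

theorem get_required_forex_pairs_spec : Claim_equal_get_required_forex_pairs := by
  intro countries _
  unfold Spec_get_required_forex_pairs
  have hb : ∀ x : String,
      PySem.Set.contains (countries.foldl (fun s country =>
        match pvCountryCurrencies.get? country with
        | some v => PySem.Set.add s v
        | none => s) PySem.Set.empty) x
      = countries.any (fun c => pvCountryCurrencies.get? c == some x) := by
    intro x
    rw [Bool.eq_iff_iff]
    simp only [PySem.Set.contains, List.contains_iff_mem, mem_currFold, PySem.Set.empty,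
      List.not_mem_nil, false_or, List.any_eq_true]
  simp only [get_required_forex_pairs, get_required_forex_pairs_alt, hb, pvForexRules,
    List.filter_cons, List.filter_nil]
  generalize countries.any (fun c => pvCountryCurrencies.get? c == some "EUR") = b1
  generalize countries.any (fun c => pvCountryCurrencies.get? c == some "GBP") = b2
  generalize countries.any (fun c => pvCountryCurrencies.get? c == some "JPY") = b3
  generalize countries.any (fun c => pvCountryCurrencies.get? c == some "CNY") = b4
  generalize countries.any (fun c => pvCountryCurrencies.get? c == some "CHF") = b5
  cases b1 <;> cases b2 <;> cases b3 <;> cases b4 <;> cases b5 <;> simp
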